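-- pv_equiv track=rewrite | github.com/nikolashermanns-netizen/Bestell_Bot_Voice | sip/audio_bridge.py | _encode_ulaw_sample
-- ===== SOURCE A (Python) =====
-- def _encode_ulaw_sample(sample: int) -> int:
--     """Encodiert einen Sample-Wert zu u-law."""
--     BIAS = 0x84
--     CLIP = 32635
--
--     # Clipping
--     if sample > CLIP:
--         sample = CLIP
--     elif sample < -CLIP:
--         sample = -CLIP
--
--     # Vorzeichen extrahieren
--     if sample < 0:
--         sign = 0x80
--         sample = -sample
--     else:
--         sign = 0
--
--     sample += BIAS
--
--     # Exponent finden
--     exponent = 7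
--     exp_mask = 0x4000
--     for _ in range(8):
--         if sample & exp_mask:
--             break
--         exponent -= 1
--         exp_mask >>= 1
--
--     # Mantisse extrahieren
--     mantissa = (sample >> (exponent + 3)) & 0x0F
--
--     # u-law Byte zusammensetzen
--     ulaw_byte = ~(sign | (exponent << 4) | mantissa) & 0xFF
--
--     return ulaw_byte
-- ===== SOURCE B (Python) =====
-- def _encode_ulaw_sample(sample: int) -> int:
--     """Encodiert einen Sample-Wert zu u-law (closed-form exponent via bit_length)."""
--     BIAS = 0x84
--     CLIP = 32635
--
--     if sample > CLIP:
--         sample = CLIP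
--     elif sample < -CLIP:
--         sample = -CLIP
--
--     sign = 0x80 if sample < 0 else 0
--     biased = (-sample if sample < 0 else sample) + BIAS
--
--     # biased is in [0x84, 0x7FFF], so bit_length is in [8, 15] and exponent in [0, 7]
--     exponent = biased.bit_length() - 8
--
--     mantissa = (biased >> (exponent + 3)) & 0x0F
--     return ~(sign | (exponent << 4) | mantissa) & 0xFF
-- ===== Notes on version B (the rewrite author's own statement) =====
-- stated objective: simpler
-- what changed: The 8-iteration mask-shifting loop that searches for the exponent is replaced by the closed form exponent = biased.bit_length() - 8; clipping, sign, bias, mantissa and byte assembly are unchanged.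
import Mathlib
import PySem

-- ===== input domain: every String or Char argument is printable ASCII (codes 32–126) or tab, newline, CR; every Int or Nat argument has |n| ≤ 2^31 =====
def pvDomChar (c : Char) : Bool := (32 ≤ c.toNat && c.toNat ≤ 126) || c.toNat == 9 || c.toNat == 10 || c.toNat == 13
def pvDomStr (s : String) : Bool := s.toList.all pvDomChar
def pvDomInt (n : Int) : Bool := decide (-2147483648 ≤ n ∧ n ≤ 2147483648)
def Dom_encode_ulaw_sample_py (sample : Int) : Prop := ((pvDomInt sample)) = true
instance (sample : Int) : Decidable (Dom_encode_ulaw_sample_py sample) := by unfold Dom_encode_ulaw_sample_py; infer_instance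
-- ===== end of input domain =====

-- B replaces A's 8-iteration exponent-search loop by the closed form bit_length(biased) - 8 (objective: simpler).

-- ===== PORT A =====
-- A's exponent loop: up to 8 iterations, break when `sample & exp_mask` is nonzero.
-- `exp_mask >>= 1` on a nonnegative int is exactly floordiv by 2.
def expLoopA (sample : Int) : Nat → Int → Int → Int
  | 0, exponent, _ => exponent
  | k + 1, exponent, expMask =>
    if PySem.Int.band sample expMask ≠ 0 then exponent
    else expLoopA sample k (exponent - 1) (PySem.Int.floordiv expMask 2)

def encode_ulaw_sample_py (sample : Int) : Int :=
  let sample := if sample > 32635 then 32635 else if sample < -32635 then -32635 else sample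
  let p := if sample < 0 then ((0x80 : Int), -sample) else ((0 : Int), sample)
  let sample := p.2 + 0x84
  let exponent := expLoopA sample 8 7 0x4000
  -- `sample >> (exponent + 3)`: arithmetic right shift = floordiv by 2^(exponent+3); exponent + 3 ≥ 0 always here
  let mantissa := PySem.Int.band (PySem.Int.floordiv sample (2 ^ (exponent + 3).toNat)) 0x0F
  -- `~x & 0xFF` with ~x = -x - 1
  PySem.Int.band (-(PySem.Int.bor p.1 (PySem.Int.bor (exponent * 16) mantissa)) - 1) 0xFF

-- ===== PORT B =====
def encode_ulaw_sample_py_alt (sample : Int) : Int :=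
  let sample := if sample > 32635 then 32635 else if sample < -32635 then -32635 else sample
  let sign : Int := if sample < 0 then 0x80 else 0
  let biased := (if sample < 0 then -sample else sample) + 0x84
  -- biased ∈ [0x84, 0x7FFF]: bit_length ∈ [8, 15], exponent ∈ [0, 7]
  let exponent : Int := (PySem.Int.bitLength biased : Int) - 8
  let mantissa := PySem.Int.band (PySem.Int.floordiv biased (2 ^ (exponent + 3).toNat)) 0x0F
  PySem.Int.band (-(PySem.Int.bor sign (PySem.Int.bor (exponent * 16) mantissa)) - 1) 0xFF

-- ===== PRECONDITION & SPEC =====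
def Spec_encode_ulaw_sample_py (sample : Int) (out : Int) : Prop := out = encode_ulaw_sample_py_alt sample
instance (sample : Int) (out : Int) : Decidable (Spec_encode_ulaw_sample_py sample out) := by unfold Spec_encode_ulaw_sample_py; infer_instance

-- ===== CLAIM (what is proved, stated in full; the proofs are below) =====
def Claim_equal_encode_ulaw_sample_py : Prop := ∀ (sample : Int), Dom_encode_ulaw_sample_py sample → Spec_encode_ulaw_sample_py sample (encode_ulaw_sample_py sample)

-- ===== LEMMAS AND PROOFS =====

lemma expLoopA_succ (s : Int) (k : Nat) (e m : Int) :
    expLoopA s (k + 1) e m =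
      if PySem.Int.band s m ≠ 0 then e else expLoopA s k (e - 1) (PySem.Int.floordiv m 2) := rfl

lemma loop_skip (s : Int) (k : Nat) (e m m' : Int) (hz : PySem.Int.band s m = 0)
    (hm : PySem.Int.floordiv m 2 = m') : expLoopA s (k + 1) e m = expLoopA s k (e - 1) m' := by
  rw [expLoopA_succ, if_neg (by simp [hz]), hm]

lemma loop_hit (s : Int) (k : Nat) (e m : Int) (h : PySem.Int.band s m ≠ 0) :
    expLoopA s (k + 1) e m = e := by rw [expLoopA_succ, if_pos h]

lemma band_zero' (n j : Nat) (m : Int) (hm : ((2 ^ j : Nat) : Int) = m) (h : (n : Int) < m) :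
    PySem.Int.band (n : Int) m = 0 := by
  subst hm
  rw [PySem.Int.band_natCast]
  have hj : n < 2 ^ j := by exact_mod_cast h
  rw [Nat.and_two_pow, Nat.testBit_lt_two_pow hj]
  simp

lemma band_top' (n k : Nat) (m : Int) (hm : ((2 ^ k : Nat) : Int) = m)
    (h1 : m ≤ (n : Int)) (h2 : (n : Int) < 2 * m) : PySem.Int.band (n : Int) m ≠ 0 := by
  subst hm
  rw [PySem.Int.band_natCast]
  have hk1 : 2 ^ k ≤ n := by exact_mod_cast h1
  have hk2 : n < 2 ^ (k + 1) := by rw [pow_succ]; omega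
  have ht : n.testBit k = true := by
    have hd : n / 2 ^ k = 1 := Nat.div_eq_of_lt_le (by omega) (by rw [pow_succ] at hk2; omega)
    rw [Nat.testBit, Nat.shiftRight_eq_div_pow, hd]
    decide
  rw [Nat.and_two_pow, ht]
  simp

lemma loop_eq_bitLength (n : Nat) (hlo : 132 ≤ n) (hhi : n ≤ 32767) :
    expLoopA (n : Int) 8 7 0x4000 = (PySem.Int.bitLength (n : Int) : Int) - 8 := by
  have hne : (n : Int) ≠ 0 := by omega
  have hbl1 : n < 2 ^ PySem.Int.bitLength (n : Int) := by
    have := PySem.Int.lt_two_pow_bitLength (n : Int); simpa using this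
  have hbl2 : 2 ^ (PySem.Int.bitLength (n : Int) - 1) ≤ n := by
    have := PySem.Int.two_pow_bitLength_le (n : Int) hne; simpa using this
  generalize hg : PySem.Int.bitLength (n : Int) = bl at hbl1 hbl2 ⊢
  have h8 : 8 ≤ bl := by
    by_contra h
    have : 2 ^ bl ≤ 2 ^ 7 := Nat.pow_le_pow_right (by norm_num) (by omega)
    norm_num at this; omega
  have h15 : bl ≤ 15 := by
    by_contra h
    have : 2 ^ 15 ≤ 2 ^ (bl - 1) := Nat.pow_le_pow_right (by norm_num) (by omega)
    norm_num at this; omega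
  interval_cases bl <;> norm_num at hbl1 hbl2
  · -- bl = 8 : 128 ≤ n < 256
    rw [loop_skip _ _ _ _ 8192 (band_zero' n 14 16384 (by norm_num) (by omega)) (by decide),
        loop_skip _ _ _ _ 4096 (band_zero' n 13 8192 (by norm_num) (by omega)) (by decide),
        loop_skip _ _ _ _ 2048 (band_zero' n 12 4096 (by norm_num) (by omega)) (by decide),
        loop_skip _ _ _ _ 1024 (band_zero' n 11 2048 (by norm_num) (by omega)) (by decide),
        loop_skip _ _ _ _ 512 (band_zero' n 10 1024 (by norm_num) (by omega)) (by decide),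
        loop_skip _ _ _ _ 256 (band_zero' n 9 512 (by norm_num) (by omega)) (by decide),
        loop_skip _ _ _ _ 128 (band_zero' n 8 256 (by norm_num) (by omega)) (by decide),
        loop_hit _ _ _ _ (band_top' n 7 128 (by norm_num) (by omega) (by omega))]
    norm_num
  · rw [loop_skip _ _ _ _ 8192 (band_zero' n 14 16384 (by norm_num) (by omega)) (by decide),
        loop_skip _ _ _ _ 4096 (band_zero' n 13 8192 (by norm_num) (by omega)) (by decide),
        loop_skip _ _ _ _ 2048 (band_zero' n 12 4096 (by norm_num) (by omega)) (by decide),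
        loop_skip _ _ _ _ 1024 (band_zero' n 11 2048 (by norm_num) (by omega)) (by decide),
        loop_skip _ _ _ _ 512 (band_zero' n 10 1024 (by norm_num) (by omega)) (by decide),
        loop_skip _ _ _ _ 256 (band_zero' n 9 512 (by norm_num) (by omega)) (by decide),
        loop_hit _ _ _ _ (band_top' n 8 256 (by norm_num) (by omega) (by omega))]
    norm_num
  · rw [loop_skip _ _ _ _ 8192 (band_zero' n 14 16384 (by norm_num) (by omega)) (by decide),
        loop_skip _ _ _ _ 4096 (band_zero' n 13 8192 (by norm_num) (by omega)) (by decide),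
        loop_skip _ _ _ _ 2048 (band_zero' n 12 4096 (by norm_num) (by omega)) (by decide),
        loop_skip _ _ _ _ 1024 (band_zero' n 11 2048 (by norm_num) (by omega)) (by decide),
        loop_skip _ _ _ _ 512 (band_zero' n 10 1024 (by norm_num) (by omega)) (by decide),
        loop_hit _ _ _ _ (band_top' n 9 512 (by norm_num) (by omega) (by omega))]
    norm_num
  · rw [loop_skip _ _ _ _ 8192 (band_zero' n 14 16384 (by norm_num) (by omega)) (by decide),
        loop_skip _ _ _ _ 4096 (band_zero' n 13 8192 (by norm_num) (by omega)) (by decide),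
        loop_skip _ _ _ _ 2048 (band_zero' n 12 4096 (by norm_num) (by omega)) (by decide),
        loop_skip _ _ _ _ 1024 (band_zero' n 11 2048 (by norm_num) (by omega)) (by decide),
        loop_hit _ _ _ _ (band_top' n 10 1024 (by norm_num) (by omega) (by omega))]
    norm_num
  · rw [loop_skip _ _ _ _ 8192 (band_zero' n 14 16384 (by norm_num) (by omega)) (by decide),
        loop_skip _ _ _ _ 4096 (band_zero' n 13 8192 (by norm_num) (by omega)) (by decide),
        loop_skip _ _ _ _ 2048 (band_zero' n 12 4096 (by norm_num) (by omega)) (by decide),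
        loop_hit _ _ _ _ (band_top' n 11 2048 (by norm_num) (by omega) (by omega))]
    norm_num
  · rw [loop_skip _ _ _ _ 8192 (band_zero' n 14 16384 (by norm_num) (by omega)) (by decide),
        loop_skip _ _ _ _ 4096 (band_zero' n 13 8192 (by norm_num) (by omega)) (by decide),
        loop_hit _ _ _ _ (band_top' n 12 4096 (by norm_num) (by omega) (by omega))]
    norm_num
  · rw [loop_skip _ _ _ _ 8192 (band_zero' n 14 16384 (by norm_num) (by omega)) (by decide),
        loop_hit _ _ _ _ (band_top' n 13 8192 (by norm_num) (by omega) (by omega))]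
    norm_num
  · rw [loop_hit _ _ _ _ (band_top' n 14 16384 (by norm_num) (by omega) (by omega))]
    norm_num

lemma core_eq_pos (n : Nat) (h1 : n ≤ 32635) :
    encode_ulaw_sample_py (n : Int) = encode_ulaw_sample_py_alt (n : Int) := by
  have hA : ¬ ((n : Int) > 32635) := by omega
  have hB : ¬ ((n : Int) < -32635) := by omega
  have hC : ¬ ((n : Int) < 0) := by omega
  simp only [encode_ulaw_sample_py, encode_ulaw_sample_py_alt, if_neg hA, if_neg hB, if_neg hC]
  have hc : ((n : Int) + 0x84) = ((n + 132 : Nat) : Int) := by push_cast; ring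
  rw [hc, loop_eq_bitLength (n + 132) (by omega) (by omega)]

lemma core_eq_neg (n : Nat) (h0 : 0 < n) (h1 : n ≤ 32635) :
    encode_ulaw_sample_py (-(n : Int)) = encode_ulaw_sample_py_alt (-(n : Int)) := by
  have hA : ¬ (-(n : Int) > 32635) := by omega
  have hB : ¬ (-(n : Int) < -32635) := by omega
  have hC : -(n : Int) < 0 := by omega
  simp only [encode_ulaw_sample_py, encode_ulaw_sample_py_alt, if_neg hA, if_neg hB, if_pos hC]
  have hc : (-(-(n : Int)) + 0x84) = ((n + 132 : Nat) : Int) := by push_cast; ring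
  rw [hc, loop_eq_bitLength (n + 132) (by omega) (by omega)]

-- ===== VERDICT (by name: the statement is the Claim_ definition above) =====
theorem encode_ulaw_sample_py_spec : Claim_equal_encode_ulaw_sample_py := by
  intro s _
  unfold Spec_encode_ulaw_sample_py
  by_cases hp : s > 32635
  · simp only [encode_ulaw_sample_py, encode_ulaw_sample_py_alt, if_pos hp]; decide
  · by_cases hn : s < -32635
    · simp only [encode_ulaw_sample_py, encode_ulaw_sample_py_alt, if_neg hp, if_pos hn]; decide
    · by_cases hs : 0 ≤ s
      · have h1 : s = ((s.toNat : Nat) : Int) := by omega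
        rw [h1]; exact core_eq_pos s.toNat (by omega)
      · have h1 : s = -((s.natAbs : Nat) : Int) := by omega
        rw [h1]; exact core_eq_neg s.natAbs (by omega) (by omega)
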